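-- pv_equiv track=rewrite | github.com/bedhededdy/advent-of-code | 2023/p7.py | is_pair
-- ===== SOURCE A (Python) =====
-- from collections import Counter
--
-- def is_pair(hand):
--     hand = hand.split(" ")[0]
--     card_counts = Counter(hand)
--     pairs = [count > 1 for count in card_counts.values()]
--     pairs = [pair for pair in pairs if pair] # Filter out the False values
--     if len(pairs) > 0:
--         return True
--     return False
-- ===== SOURCE B (Python) =====
-- def is_pair(hand):
--     cards = sorted(hand.split(" ")[0])
--     for i in range(1, len(cards)):
--         if cards[i] == cards[i - 1]:
--             return True
--     return False
-- ===== Notes on version B (the rewrite author's own statement) =====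
-- stated objective: alternative
-- what changed: Replaces the Counter/boolean-comprehension/filter pipeline with a sort-then-scan: sort the cards and return True as soon as two adjacent sorted cards are equal, so no counting structure is built at all.
import Mathlib
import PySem

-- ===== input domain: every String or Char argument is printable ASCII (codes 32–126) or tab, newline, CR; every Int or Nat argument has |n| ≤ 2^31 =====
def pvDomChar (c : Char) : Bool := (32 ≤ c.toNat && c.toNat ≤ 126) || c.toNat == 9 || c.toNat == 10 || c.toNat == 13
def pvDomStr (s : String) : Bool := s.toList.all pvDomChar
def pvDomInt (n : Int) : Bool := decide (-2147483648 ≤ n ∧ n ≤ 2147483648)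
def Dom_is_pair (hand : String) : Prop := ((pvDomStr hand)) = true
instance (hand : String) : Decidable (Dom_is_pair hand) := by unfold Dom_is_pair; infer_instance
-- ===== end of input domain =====

-- ===== PORT A =====
-- B replaces A's Counter/comprehension/filter pipeline by sorting the cards and scanning
-- for an equal adjacent pair (objective: alternative algorithm).
-- hand.split(" ")[0]: the separator is nonempty so split? returns some, and the result list is
-- never empty, so index 0 always exists; getD/headD are exact here.
def is_pair (hand : String) : Bool :=
  let hand' : String := ((PySem.Str.split? hand " ").getD []).headD ""
  let card_counts : PySem.Dict Char Int := PySem.Dict.counter hand'.toList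
  let pairs : List Bool := card_counts.values.map (fun count => decide (count > 1))
  let pairs' : List Bool := pairs.filter (fun pair => pair)
  if pairs'.length > 0 then true else false

-- ===== PORT B =====
-- the 'for i in range(1, len(cards))' loop with early return: walk adjacent pairs of the sorted list
def adjEqScan : List Char → Bool
  | a :: b :: t => if a == b then true else adjEqScan (b :: t)
  | _ => false

def is_pair_alt (hand : String) : Bool :=
  let cards : List Char :=
    PySem.List.sorted (((PySem.Str.split? hand " ").getD []).headD "").toList (fun x => x) false
  adjEqScan cards

-- ===== PRECONDITION & SPEC =====
def Spec_is_pair (hand : String) (out : Bool) : Prop := out = is_pair_alt hand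
instance (hand : String) (out : Bool) : Decidable (Spec_is_pair hand out) := by unfold Spec_is_pair; infer_instance

-- ===== CLAIM (what is proved, stated in full; the proofs are below) =====
def Claim_equal_is_pair : Prop := ∀ (hand : String), Dom_is_pair hand → Spec_is_pair hand (is_pair hand)

-- ===== LEMMAS AND PROOFS =====

-- the adjacent scan returns false exactly on chains of pairwise-distinct neighbours
lemma adjEqScan_eq_false_iff (l : List Char) :
    adjEqScan l = false ↔ l.IsChain (· ≠ ·) := by
  induction l with
  | nil => simp [adjEqScan]
  | cons a t ih =>
    cases t with
    | nil => simp [adjEqScan]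
    | cons b t' =>
      rw [List.isChain_cons_cons]
      by_cases hab : a = b
      · simp [adjEqScan, hab]
      · simp [adjEqScan, hab, ih]

-- on a (≤)-sorted list, neighbour-distinctness is full duplicate-freedom
lemma isChain_ne_iff_nodup (l : List Char) (hs : l.Pairwise (· ≤ ·)) :
    l.IsChain (· ≠ ·) ↔ l.Nodup := by
  constructor
  · intro hc
    have hlt : l.IsChain (· < ·) := by
      induction l with
      | nil => exact List.IsChain.nil
      | cons a t ih =>
        cases t with
        | nil => exact List.isChain_singleton a
        | cons b t' =>
          rw [List.isChain_cons_cons] at hc ⊢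
          rw [List.pairwise_cons] at hs
          exact ⟨lt_of_le_of_ne (hs.1 b (by simp)) hc.1, ih hs.2 hc.2⟩
    have := (List.isChain_iff_pairwise).mp hlt
    exact this.imp ne_of_lt
  · intro h
    exact List.Pairwise.isChain h

-- A's pipeline over a card list xs detects exactly "xs is not duplicate-free".
lemma pipeline_eq_not_nodup (xs : List Char) :
    ((((PySem.Dict.counter xs).values.map (fun count => decide (count > 1))).filter
        (fun pair => pair)).length > 0) ↔ ¬ xs.Nodup := by
  have hvals : (PySem.Dict.counter xs).values =
      (PySem.Set.ofList xs).map (fun k => (PySem.Dict.counter xs).getD k 0) := by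
    rw [PySem.Dict.values_eq_map_keys _ (PySem.Dict.nodup_keys_counter xs) 0,
        PySem.Dict.keys_counter]
  rw [hvals]
  simp only [List.map_map, List.length_pos_iff, List.filter_eq_nil_iff, ne_eq]
  constructor
  · intro h hnd
    apply h
    intro b hb hbt
    simp only [List.mem_map, Function.comp] at hb
    obtain ⟨k, _, hk⟩ := hb
    rw [← hk] at hbt
    simp only [decide_eq_true_eq, PySem.Dict.getD_counter] at hbt
    have := (List.nodup_iff_count_le_one.mp hnd) k
    omega
  · intro h hall
    apply h
    rw [List.nodup_iff_count_le_one]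
    intro k
    by_contra hk
    push Not at hk
    have hkmem : k ∈ PySem.Set.ofList xs := by
      rw [PySem.Set.mem_ofList]
      exact List.count_pos_iff.mp (by omega)
    have := hall (decide ((PySem.Dict.counter xs).getD k 0 > 1))
      (List.mem_map_of_mem hkmem)
    rw [PySem.Dict.getD_counter] at this
    simp only [decide_eq_true_eq] at this
    apply this
    exact_mod_cast hk

-- ===== VERDICT (by name: the statement is the Claim_ definition above) =====
theorem is_pair_spec : Claim_equal_is_pair := by
  intro hand _
  unfold Spec_is_pair is_pair is_pair_alt
  set cards : String := ((PySem.Str.split? hand " ").getD []).headD "" with hc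
  have hperm := PySem.List.sorted_perm cards.toList (fun x => x) false
  have hpw : (PySem.List.sorted cards.toList (fun x => x) false).Pairwise (· ≤ ·) :=
    PySem.List.sorted_pairwise cards.toList (fun x => x)
  have key : adjEqScan (PySem.List.sorted cards.toList (fun x => x) false)
      = !decide cards.toList.Nodup := by
    by_cases hnd : cards.toList.Nodup
    · have : adjEqScan (PySem.List.sorted cards.toList (fun x => x) false) = false := by
        rw [adjEqScan_eq_false_iff, isChain_ne_iff_nodup _ hpw]
        exact hperm.nodup_iff.mpr hnd
      simp [this, hnd]
    · have : adjEqScan (PySem.List.sorted cards.toList (fun x => x) false) = true := by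
        by_contra hfalse
        rw [Bool.not_eq_true, adjEqScan_eq_false_iff, isChain_ne_iff_nodup _ hpw] at hfalse
        exact hnd (hperm.nodup_iff.mp hfalse)
      simp [this, hnd]
  rw [key]
  by_cases hnd : cards.toList.Nodup
  · rw [if_neg (by rw [pipeline_eq_not_nodup]; exact not_not_intro hnd)]
    simp [hnd]
  · rw [if_pos ((pipeline_eq_not_nodup cards.toList).mpr hnd)]
    simp [hnd]
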